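-- pv_equiv track=rewrite | github.com/xile42/leetcode | python3/LCP 72. 补给马车.py | supplyWagon
-- ===== SOURCE A (Python) =====
-- from typing import List
--
-- def supplyWagon(supplies: List[int]) -> List[int]:
--
--     n = len(supplies) // 2
--     while len(supplies) > n:
--         idx = 1
--         for i in range(1, len(supplies)):
--             if supplies[i] + supplies[i - 1] < supplies[idx] + supplies[idx - 1]:
--                 idx = i
--         supplies[idx - 1] += supplies[idx]
--         supplies.pop(idx)
--
--     return supplies
-- ===== SOURCE B (Python) =====
-- from typing import List
--
-- # Different algorithm from A's repeated linear argmin scan: a sorted event queue of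
-- # (pair-sum, left-position) with lazy invalidation over a doubly linked list of
-- # survivors (arrays indexed by ORIGINAL position, -1 = no neighbour).  Each round
-- # pops the smallest still-valid event instead of rescanning all pairs; only the two
-- # pair-sums adjacent to a merge give rise to new events.  Tie-break by left position
-- # equals A's leftmost-minimal-pair choice because surviving positions stay in order.
-- # Works on a copy; A mutates its argument in place (return-value equivalence only).
--
-- def _insort(lst, e):
--     i = 0
--     while i < len(lst) and lst[i] < e:
--         i += 1
--     lst.insert(i, e)
--
-- def supplyWagon(supplies: List[int]) -> List[int]:
--     m = len(supplies)
--     if m == 0: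
--         return []
--     vals = list(supplies)
--     alive = [True] * m
--     nxt = [i + 1 for i in range(m - 1)] + [-1]
--     prv = [-1] + [i for i in range(m - 1)]
--     events = []
--     for i in range(m - 1):
--         _insort(events, (vals[i] + vals[i + 1], i))
--     for _ in range(m - m // 2):
--         while True:
--             s, p = events.pop(0)
--             q = nxt[p]
--             if alive[p] and q >= 0 and vals[p] + vals[q] == s:
--                 break
--         vals[p] += vals[q]
--         alive[q] = False
--         r = nxt[q]
--         nxt[p] = r
--         if r >= 0:
--             prv[r] = p
--             _insort(events, (vals[p] + vals[r], p))
--         l = prv[p]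
--         if l >= 0:
--             _insort(events, (vals[l] + vals[p], l))
--     out = []
--     i = 0
--     while i >= 0:
--         out.append(vals[i])
--         i = nxt[i]
--     return out
-- ===== Notes on version B (the rewrite author's own statement) =====
-- stated objective: alternative
-- what changed: B replaces A's per-round linear argmin rescan with a priority queue: a sorted (pair-sum, left-position) event list with lazy invalidation over a doubly linked list of survivors, popping the smallest still-valid event each round and pushing only the two pair-sums adjacent to a merge; tie-break by left position reproduces A's leftmost choice.
import Mathlib
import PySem

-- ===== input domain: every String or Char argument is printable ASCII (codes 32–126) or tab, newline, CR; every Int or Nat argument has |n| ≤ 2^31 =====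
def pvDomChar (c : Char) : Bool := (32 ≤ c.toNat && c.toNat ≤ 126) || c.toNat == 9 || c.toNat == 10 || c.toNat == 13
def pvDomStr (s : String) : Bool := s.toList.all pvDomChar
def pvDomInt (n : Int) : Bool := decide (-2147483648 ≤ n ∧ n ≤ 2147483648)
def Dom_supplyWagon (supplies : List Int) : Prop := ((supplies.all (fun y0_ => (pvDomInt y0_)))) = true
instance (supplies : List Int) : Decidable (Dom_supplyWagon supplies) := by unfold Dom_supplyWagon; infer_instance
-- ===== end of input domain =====

-- B replaces A's per-round linear argmin rescan by a sorted (pair-sum, left-position)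
-- event queue with lazy invalidation over a doubly linked list of survivors.
-- Return-value equivalence only: Python A mutates its argument in place, B works on a copy.

-- ===== PORT A =====
def supplyAStep (s : List Int) : List Int :=
  let idx : Int := (PySem.List.pyRange 1 (PySem.List.len s) 1).foldl
    (fun idx i =>
      if PySem.List.pyGetD s i 0 + PySem.List.pyGetD s (i - 1) 0 <
         PySem.List.pyGetD s idx 0 + PySem.List.pyGetD s (idx - 1) 0 then i else idx) 1
  let s' := PySem.List.pySetD s (idx - 1)
      (PySem.List.pyGetD s (idx - 1) 0 + PySem.List.pyGetD s idx 0)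
  match PySem.List.pop? s' idx with
  | some r => r.2
  | none => s'

def supplyALoop (n : Int) : Nat → List Int → List Int
  | 0, s => s
  | fuel + 1, s => if n < PySem.List.len s then supplyALoop n fuel (supplyAStep s) else s

def supplyWagon (supplies : List Int) : List Int :=
  supplyALoop (PySem.Int.floordiv (PySem.List.len supplies) 2) supplies.length supplies

-- ===== PORT B =====
-- Python tuple comparison (s, p) < (s', p') on int pairs.
def pairLtB (a b : Int × Int) : Bool := a.1 < b.1 || (a.1 == b.1 && a.2 < b.2)

-- Source B's _insort: linear scan to the first element not < e, insert there.
def insortB (lst : List (Int × Int)) (e : Int × Int) : List (Int × Int) :=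
  match lst with
  | [] => [e]
  | x :: t => if pairLtB x e then x :: insortB t e else e :: x :: t

-- Source B's validity test `alive[p] and q >= 0 and vals[p] + vals[q] == s` with q = nxt[p]
def checkB (vals : List Int) (alive : List Bool) (nxt : List Int) (s p : Int) : Bool :=
  PySem.List.pyGetD alive p false && decide (0 ≤ PySem.List.pyGetD nxt p 0) &&
  (PySem.List.pyGetD vals p 0 + PySem.List.pyGetD vals (PySem.List.pyGetD nxt p 0) 0 == s)

-- Source B's inner `while True` pop-until-valid loop (none = Python IndexError on empty list).
def popValidB (vals : List Int) (alive : List Bool) (nxt : List Int) :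
    List (Int × Int) → Option (Int × Int × Int × List (Int × Int))
  | [] => none
  | (s, p) :: rest =>
      if checkB vals alive nxt s p then some (s, p, PySem.List.pyGetD nxt p 0, rest)
      else popValidB vals alive nxt rest

-- one round of Source B's outer loop (state: vals, alive, nxt, prv, events)
def stepB (st : List Int × List Bool × List Int × List Int × List (Int × Int)) :
    List Int × List Bool × List Int × List Int × List (Int × Int) :=
  match popValidB st.1 st.2.1 st.2.2.1 st.2.2.2.2 with
  | none => st
  | some (_, p, q, events1) =>
      let vals := st.1
      let alive := st.2.1
      let nxt := st.2.2.1
      let prv := st.2.2.2.1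
      let vals1 := PySem.List.pySetD vals p (PySem.List.pyGetD vals p 0 + PySem.List.pyGetD vals q 0)
      let alive1 := PySem.List.pySetD alive q false
      let r := PySem.List.pyGetD nxt q 0
      let nxt1 := PySem.List.pySetD nxt p r
      let prv1 := if 0 ≤ r then PySem.List.pySetD prv r p else prv
      let events2 := if 0 ≤ r then
          insortB events1 (PySem.List.pyGetD vals1 p 0 + PySem.List.pyGetD vals1 r 0, p)
        else events1
      let l := PySem.List.pyGetD prv1 p 0
      let events3 := if 0 ≤ l then
          insortB events2 (PySem.List.pyGetD vals1 l 0 + PySem.List.pyGetD vals1 p 0, l)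
        else events2
      (vals1, alive1, nxt1, prv1, events3)

-- Source B's final `while i >= 0` walk along the next-chain; the fuel only bounds the
-- (acyclic) chain length, Python's while needs none.
def walkB (vals nxt : List Int) : Nat → Int → List Int
  | 0, _ => []
  | fuel + 1, i =>
      if 0 ≤ i then PySem.List.pyGetD vals i 0 :: walkB vals nxt fuel (PySem.List.pyGetD nxt i 0)
      else []

def supplyWagon_alt (supplies : List Int) : List Int :=
  let m := supplies.length
  if m = 0 then [] else
  let vals := supplies
  let alive := List.replicate m true
  let nxt := ((List.range (m - 1)).map (fun (i : Nat) => (i : Int) + 1)) ++ [-1]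
  let prv := (-1 : Int) :: (List.range (m - 1)).map (fun (i : Nat) => (i : Int))
  let events := (List.range (m - 1)).foldl
      (fun ev i => insortB ev (supplies.getD i 0 + supplies.getD (i + 1) 0, (i : Int))) []
  let st := (List.range (m - m / 2)).foldl (fun st _ => stepB st) (vals, alive, nxt, prv, events)
  walkB st.1 st.2.2.1 m 0

-- ===== PRECONDITION & SPEC =====
-- Pre_ excludes exactly the singleton lists: there Python A raises IndexError
-- (supplies[1] with one element) and Python B raises IndexError too (pop from empty event list).
def Pre_supplyWagon (supplies : List Int) : Prop := supplies.length ≠ 1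
instance (supplies : List Int) : Decidable (Pre_supplyWagon supplies) := by
  unfold Pre_supplyWagon; infer_instance
def pvWitness_supplyWagon : List Int := ([7, 3, 6, 1, 8])

def Spec_supplyWagon (supplies : List Int) (out : List Int) : Prop := out = supplyWagon_alt supplies
instance (supplies : List Int) (out : List Int) : Decidable (Spec_supplyWagon supplies out) := by unfold Spec_supplyWagon; infer_instance

-- ===== CLAIM (what is proved, stated in full; the proofs are below) =====
def Claim_equal_supplyWagon : Prop := ∀ (supplies : List Int), Dom_supplyWagon supplies → Pre_supplyWagon supplies → Spec_supplyWagon supplies (supplyWagon supplies)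

-- ===== LEMMAS AND PROOFS =====

-- ---------- common spec: merge the leftmost minimal adjacent pair ----------

/-- list of adjacent pair sums -/
def pairSums : List Int → List Int
  | a :: b :: t => (a + b) :: pairSums (b :: t)
  | _ => []

/-- first index of the minimal element (index-scan, first wins ties) -/
def argminSums (sums : List Int) : Nat :=
  match List.range sums.length with
  | [] => 0
  | k0 :: rest => rest.foldl (fun j k => if sums.getD k 0 < sums.getD j 0 then k else j) k0

/-- one merge round on the plain value list -/
def specStep (s : List Int) : List Int :=
  let j := argminSums (pairSums s)
  (s.set j (s.getD j 0 + s.getD (j + 1) 0)).eraseIdx (j + 1)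

theorem pairSums_length : ∀ (s : List Int), (pairSums s).length = s.length - 1
  | [] => rfl
  | [_] => rfl
  | a :: b :: t => by
      simp [pairSums, pairSums_length (b :: t)]

theorem pairSums_getD : ∀ (s : List Int) (k : Nat), k + 1 < s.length →
    (pairSums s).getD k 0 = s.getD k 0 + s.getD (k + 1) 0
  | a :: b :: t, 0, _ => by simp [pairSums]
  | a :: b :: t, k + 1, h => by
      simpa [pairSums] using pairSums_getD (b :: t) k (by simpa using h)

theorem set_at_len : ∀ (A : List Int) (b : Int) (C : List Int) (v : Int),
    (A ++ b :: C).set A.length v = A ++ v :: C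
  | [], _, _, _ => rfl
  | a :: A, b, C, v => by simp [set_at_len A b C v]

theorem erase_at_len : ∀ (A : List Int) (b : Int) (C : List Int),
    (A ++ b :: C).eraseIdx A.length = A ++ C
  | [], _, _ => rfl
  | a :: A, b, C => by simp [erase_at_len A b C]

theorem getD_at_len : ∀ (A : List Int) (b : Int) (C : List Int) (d : Int),
    (A ++ b :: C).getD A.length d = b
  | [], _, _, _ => rfl
  | a :: A, b, C, d => by simp [getD_at_len A b C d]

theorem getD_at_len_succ : ∀ (A : List Int) (b c : Int) (C : List Int) (d : Int),
    (A ++ b :: c :: C).getD (A.length + 1) d = c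
  | [], _, _, _, _ => rfl
  | a :: A, b, c, C, d => by simp [getD_at_len_succ A b c C d]

theorem decompP {α : Type} : ∀ (j : Nat) (s : List α), j + 1 < s.length →
    ∃ pre x y suf, s = pre ++ x :: y :: suf ∧ pre.length = j
  | 0, x :: y :: t, _ => ⟨[], x, y, t, rfl, rfl⟩
  | j + 1, a :: s, h => by
      obtain ⟨pre, x, y, suf, rfl, hl⟩ := decompP j s (by simpa using h)
      exact ⟨a :: pre, x, y, suf, rfl, by simp [hl]⟩
  | 0, [], h => by simp at h
  | 0, [_], h => by simp at h
  | j + 1, [], h => by simp at h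

theorem merge_eq (pre : List Int) (x y : Int) (suf : List Int) :
    ((pre ++ x :: y :: suf).set pre.length (x + y)).eraseIdx (pre.length + 1)
      = pre ++ (x + y) :: suf := by
  rw [set_at_len]
  rw [show pre ++ (x + y) :: y :: suf = (pre ++ [x + y]) ++ y :: suf by simp]
  rw [show pre.length + 1 = (pre ++ [x + y]).length by simp]
  rw [erase_at_len]
  simp

-- argmin characterisation: minimal value, first among minima
theorem argmin_fold_spec (sums : List Int) :
    ∀ (l : List Nat) (j : Nat), l.Pairwise (· < ·) → (∀ k ∈ l, j < k) →
      let r := l.foldl (fun j k => if sums.getD k 0 < sums.getD j 0 then k else j) j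
      (r = j ∨ r ∈ l) ∧ sums.getD r 0 ≤ sums.getD j 0 ∧
      (∀ k ∈ l, sums.getD r 0 ≤ sums.getD k 0) ∧
      (r ≠ j → sums.getD r 0 < sums.getD j 0) ∧
      (∀ k ∈ l, k < r → sums.getD r 0 < sums.getD k 0) := by
  intro l
  induction l with
  | nil =>
      intro j _ _
      exact ⟨Or.inl rfl, le_refl _, by simp, by simp, by simp⟩
  | cons k l ih =>
      intro j hp hj
      have hp' := (List.pairwise_cons.mp hp).2
      have hkl := (List.pairwise_cons.mp hp).1
      simp only [List.foldl_cons]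
      by_cases hc : sums.getD k 0 < sums.getD j 0
      · rw [if_pos hc]
        obtain ⟨h1, h2, h3, h4, h5⟩ := ih k hp' hkl
        refine ⟨?_, le_trans h2 (le_of_lt hc), ?_, fun _ => lt_of_le_of_lt h2 hc, ?_⟩
        · rcases h1 with h | h
          · exact Or.inr (by rw [h]; exact List.mem_cons_self)
          · exact Or.inr (List.mem_cons_of_mem _ h)
        · intro k' hk'
          rcases List.mem_cons.mp hk' with rfl | hk'
          · exact h2
          · exact h3 _ hk'
        · intro k' hk' hlt
          rcases List.mem_cons.mp hk' with rfl | hk'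
          · exact h4 (by omega)
          · exact h5 _ hk' hlt
      · rw [if_neg hc]
        have hj' : ∀ k' ∈ l, j < k' := fun k' hk' => lt_trans (hj k List.mem_cons_self) (hkl _ hk')
        obtain ⟨h1, h2, h3, h4, h5⟩ := ih j hp' hj'
        refine ⟨?_, h2, ?_, h4, ?_⟩
        · rcases h1 with h | h
          · exact Or.inl h
          · exact Or.inr (List.mem_cons_of_mem _ h)
        · intro k' hk'
          rcases List.mem_cons.mp hk' with rfl | hk'
          · exact le_trans h2 (not_lt.mp hc)
          · exact h3 _ hk'
        · intro k' hk' hlt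
          rcases List.mem_cons.mp hk' with rfl | hk'
          · have hne : (l.foldl (fun j k => if sums.getD k 0 < sums.getD j 0 then k else j) j) ≠ j := by
              have := hj k' List.mem_cons_self; omega
            exact lt_of_lt_of_le (h4 hne) (not_lt.mp hc)
          · exact h5 _ hk' hlt

theorem argminSums_spec (sums : List Int) (h : sums ≠ []) :
    argminSums sums < sums.length ∧
    (∀ i < sums.length, sums.getD (argminSums sums) 0 ≤ sums.getD i 0) ∧
    (∀ i < argminSums sums, sums.getD (argminSums sums) 0 < sums.getD i 0) := by
  unfold argminSums
  have hlen : sums.length ≠ 0 := by simpa using h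
  obtain ⟨n, hn⟩ : ∃ n, sums.length = n + 1 := ⟨sums.length - 1, by omega⟩
  rw [hn, List.range_succ_eq_map]
  simp only []
  have hmap : ((List.range n).map Nat.succ).Pairwise (· < ·) := by
    refine List.Pairwise.map _ ?_ (List.pairwise_lt_range)
    intro a b hab; omega
  have h0 : ∀ k ∈ (List.range n).map Nat.succ, 0 < k := by
    intro k hk; simp only [List.mem_map, List.mem_range] at hk; omega
  obtain ⟨h1, h2, h3, h4, h5⟩ := argmin_fold_spec sums ((List.range n).map Nat.succ) 0 hmap h0
  have hrlt : ((List.range n).map Nat.succ).foldl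
      (fun j k => if sums.getD k 0 < sums.getD j 0 then k else j) 0 < n + 1 := by
    rcases h1 with h | h
    · omega
    · simp only [List.mem_map, List.mem_range] at h; omega
  refine ⟨hrlt, ?_, ?_⟩
  · intro i hi
    rcases Nat.eq_zero_or_pos i with rfl | hip
    · exact h2
    · refine h3 i ?_
      simp only [List.mem_map, List.mem_range]
      exact ⟨i - 1, by omega, by omega⟩
  · intro i hi
    rcases Nat.eq_zero_or_pos i with rfl | hip
    · exact h4 (by omega)
    · refine h5 i ?_ hi
      simp only [List.mem_map, List.mem_range]
      exact ⟨i - 1, by omega, by omega⟩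

-- ---------- A's scan computes the argmin ----------

theorem fold_shift (keyA : Int → Int) (keyB : Nat → Int) :
    ∀ (l : List Nat) (j : Nat),
      (∀ k ∈ l, keyA (1 + (k : Int)) = keyB k) → keyA (1 + (j : Int)) = keyB j →
      l.foldl (fun (a : Int) (k : Nat) => if keyA (1 + (k : Int)) < keyA a then (1 + (k : Int)) else a) (1 + (j : Int))
        = 1 + ((l.foldl (fun b k => if keyB k < keyB b then k else b) j : Nat) : Int) := by
  intro l
  induction l with
  | nil => intro j _ _; simp
  | cons k l ih =>
      intro j hl hj
      have hk : keyA (1 + (k : Int)) = keyB k := hl k (by simp)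
      have hl' : ∀ k' ∈ l, keyA (1 + (k' : Int)) = keyB k' := fun k' hk' => hl k' (by simp [hk'])
      simp only [List.foldl_cons, hk, hj]
      split
      · exact ih k hl' hk
      · exact ih j hl' hj

theorem keyA_eq (s : List Int) (k : Nat) (hk : k + 1 < s.length) :
    PySem.List.pyGetD s (1 + (k : Int)) 0 + PySem.List.pyGetD s (1 + (k : Int) - 1) 0
      = (pairSums s).getD k 0 := by
  have e2 : (1 : Int) + (k : Int) - 1 = ((k : Nat) : Int) := by ring
  have e1 : (1 : Int) + (k : Int) = ((k + 1 : Nat) : Int) := by push_cast; ring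
  rw [e2, e1]
  simp only [PySem.List.pyGetD_natCast]
  rw [pairSums_getD s k hk]
  ring

theorem argmin_fold_eq (keyA : Int → Int) (keyB : Nat → Int) (l : List Nat)
    (hl : ∀ k ∈ l, keyA (1 + (k : Int)) = keyB k)
    (h0 : keyA (1 + ((0 : Nat) : Int)) = keyB 0) :
    (0 :: l).foldl (fun (a : Int) (k : Nat) =>
        if keyA (1 + (k : Int)) < keyA a then (1 + (k : Int)) else a) 1
      = 1 + ((l.foldl (fun (b : Nat) (k : Nat) => if keyB k < keyB b then k else b) 0 : Nat) : Int) := by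
  have hone : (1 : Int) + ((0 : Nat) : Int) = 1 := by norm_num
  have hsh := fold_shift keyA keyB l 0 hl h0
  rw [hone] at hsh
  rw [List.foldl_cons, hone, if_neg (lt_irrefl _)]
  exact hsh

theorem A_idx (s : List Int) (h2 : 2 ≤ s.length) :
    (PySem.List.pyRange 1 (PySem.List.len s) 1).foldl
      (fun idx i =>
        if PySem.List.pyGetD s i 0 + PySem.List.pyGetD s (i - 1) 0 <
           PySem.List.pyGetD s idx 0 + PySem.List.pyGetD s (idx - 1) 0 then i else idx) 1
      = 1 + ((argminSums (pairSums s) : Nat) : Int) := by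
  have hB : argminSums (pairSums s)
      = ((List.range (s.length - 2)).map Nat.succ).foldl
          (fun (b : Nat) (k : Nat) =>
            if (pairSums s).getD k 0 < (pairSums s).getD b 0 then k else b) 0 := by
    unfold argminSums
    rw [pairSums_length s, show s.length - 1 = (s.length - 2) + 1 by omega,
      List.range_succ_eq_map]
  rw [hB, PySem.List.len_eq, PySem.List.pyRange_one,
    show ((s.length : Int) - 1).toNat = s.length - 1 by omega, List.foldl_map,
    show s.length - 1 = (s.length - 2) + 1 by omega, List.range_succ_eq_map]
  refine argmin_fold_eq (fun i => PySem.List.pyGetD s i 0 + PySem.List.pyGetD s (i - 1) 0)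
    (fun k => (pairSums s).getD k 0) _ ?_ ?_
  · intro k hk
    simp only [List.mem_map, List.mem_range] at hk
    obtain ⟨t, ht2, rfl⟩ := hk
    exact keyA_eq s (t + 1) (by omega)
  · exact keyA_eq s 0 (by omega)

theorem stepA_eq (s : List Int) (h2 : 2 ≤ s.length) :
    supplyAStep s = specStep s ∧ (supplyAStep s).length + 1 = s.length := by
  have hpslen := pairSums_length s
  have hne : pairSums s ≠ [] := by
    intro h; rw [h] at hpslen; simp at hpslen; omega
  obtain ⟨hjlt, -, -⟩ := argminSums_spec _ hne
  rw [hpslen] at hjlt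
  set j := argminSums (pairSums s) with hjdef
  obtain ⟨pre, x, y, suf, hs, hl⟩ := decompP j s (by omega)
  have hgj : s.getD j 0 = x := by
    rw [← hl]; conv_lhs => rw [hs]
    exact getD_at_len pre x (y :: suf) 0
  have hgj1 : s.getD (j + 1) 0 = y := by
    rw [← hl]; conv_lhs => rw [hs]
    exact getD_at_len_succ pre x y suf 0
  have hmerge : (s.set j (x + y)).eraseIdx (j + 1) = pre ++ (x + y) :: suf := by
    rw [← hl]; conv_lhs => rw [hs]
    exact merge_eq pre x y suf
  have hA : supplyAStep s = pre ++ (x + y) :: suf := by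
    simp only [supplyAStep]
    rw [A_idx s h2, ← hjdef]
    have e1 : (1 : Int) + (j : Int) - 1 = ((j : Nat) : Int) := by ring
    have e2 : (1 : Int) + (j : Int) = ((j + 1 : Nat) : Int) := by push_cast; ring
    rw [e1, e2]
    simp only [PySem.List.pyGetD_natCast, PySem.List.pySetD_natCast]
    rw [hgj, hgj1]
    have hpl : j + 1 < (s.set j (x + y)).length := by simp; omega
    rw [PySem.List.pop?_natCast _ _ hpl]
    exact hmerge
  have hB : specStep s = pre ++ (x + y) :: suf := by
    simp only [specStep, ← hjdef]
    rw [hgj, hgj1]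
    exact hmerge
  refine ⟨by rw [hA, hB], by rw [hA, hs]; simp; omega⟩

theorem loopA_eq : ∀ (k : Nat) (s : List Int) (fuel : Nat) (n : Int),
    1 ≤ n → (s.length : Int) = n + k → k ≤ fuel →
    supplyALoop n fuel s = specStep^[k] s := by
  intro k
  induction k with
  | zero =>
      intro s fuel n hn hlen _
      cases fuel with
      | zero => rfl
      | succ fuel =>
          rw [supplyALoop, if_neg]
          · rfl
          · simp only [PySem.List.len_eq]; omega
  | succ k ih =>
      intro s fuel n hn hlen hfuel
      cases fuel with
      | zero => omega
      | succ fuel =>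
          have h2 : 2 ≤ s.length := by omega
          have hlt : n < PySem.List.len s := by simp; omega
          obtain ⟨h1, hlenstep⟩ := stepA_eq s h2
          rw [supplyALoop, if_pos hlt, Function.iterate_succ_apply, ← h1]
          exact ih (supplyAStep s) fuel n hn (by push_cast at hlen ⊢; omega) (by omega)

-- ---------- B-side machinery ----------

/-- positions paired with values (B's linked list, abstractly) -/
def enumF (k : Nat) : List Int → List (Nat × Int)
  | [] => []
  | v :: t => (k, v) :: enumF (k + 1) t

/-- the events of the current adjacent pairs: (sum, left position) -/
def pairEv : List (Nat × Int) → List (Int × Int)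
  | (p, a) :: (q, b) :: t => (a + b, (p : Int)) :: pairEv ((q, b) :: t)
  | _ => []

/-- Python's tuple ≤ on int pairs -/
def lexLe (e f : Int × Int) : Prop := e.1 < f.1 ∨ (e.1 = f.1 ∧ e.2 ≤ f.2)

def NxtOk (nxt : List Int) : List (Nat × Int) → Prop
  | [] => True
  | [(p, _)] => nxt.getD p 0 = -1
  | (p, _) :: (q, b) :: t => nxt.getD p 0 = (q : Int) ∧ NxtOk nxt ((q, b) :: t)

def PrvFrom (prv : List Int) : Int → List (Nat × Int) → Prop
  | _, [] => True
  | x, (p, _) :: t => prv.getD p 0 = x ∧ PrvFrom prv (p : Int) t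

structure InvB (m : Nat) (vals : List Int) (alive : List Bool) (nxt prv : List Int)
    (ps : List (Nat × Int)) : Prop where
  hvl : vals.length = m
  hal : alive.length = m
  hnl : nxt.length = m
  hpl : prv.length = m
  hmono : (ps.map Prod.fst).Pairwise (· < ·)
  hlt : ∀ pr ∈ ps, pr.1 < m
  hvals : ∀ pr ∈ ps, vals.getD pr.1 0 = pr.2
  halive : ∀ x : Nat, (alive.getD x false = true ↔ x ∈ ps.map Prod.fst)
  hnxt : NxtOk nxt ps
  hprv : PrvFrom prv (-1) ps

structure EvOk (events : List (Int × Int)) (ps : List (Nat × Int)) : Prop where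
  hsort : events.Pairwise lexLe
  hnn : ∀ e ∈ events, 0 ≤ e.2
  hmem : ∀ e ∈ pairEv ps, e ∈ events

theorem insortB_mem (lst : List (Int × Int)) (e x : Int × Int) :
    x ∈ insortB lst e ↔ x = e ∨ x ∈ lst := by
  induction lst with
  | nil => simp [insortB]
  | cons y t ih =>
      simp only [insortB]
      split
      · rw [List.mem_cons, ih, List.mem_cons]
        tauto
      · simp only [List.mem_cons]

theorem lexLe_total (a b : Int × Int) : pairLtB a b = true → lexLe a b := by
  simp only [pairLtB, lexLe, Bool.or_eq_true, Bool.and_eq_true, decide_eq_true_eq, beq_iff_eq]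
  intro h
  rcases h with h | ⟨h1, h2⟩
  · left; simpa using h
  · right; exact ⟨by simpa using h1, le_of_lt (by simpa using h2)⟩

theorem lexLe_of_not_lt (a b : Int × Int) : ¬ pairLtB a b = true → lexLe b a := by
  simp only [pairLtB, lexLe, Bool.or_eq_true, Bool.and_eq_true, decide_eq_true_eq, beq_iff_eq]
  intro h
  push_neg at h
  rcases lt_trichotomy b.1 a.1 with h1 | h1 | h1
  · left; exact h1
  · right
    refine ⟨h1, ?_⟩
    have := h.2 h1.symm
    omega
  · exact absurd h1 (by simpa using h.1)

theorem lexLe_trans' {a b c : Int × Int} (h1 : lexLe a b) (h2 : lexLe b c) : lexLe a c := by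
  unfold lexLe at *
  rcases h1 with h1 | ⟨e1, l1⟩ <;> rcases h2 with h2 | ⟨e2, l2⟩
  · exact Or.inl (lt_trans h1 h2)
  · exact Or.inl (by omega)
  · exact Or.inl (by omega)
  · exact Or.inr ⟨by omega, by omega⟩

theorem insortB_pairwise (lst : List (Int × Int)) (e : Int × Int)
    (h : lst.Pairwise lexLe) : (insortB lst e).Pairwise lexLe := by
  induction lst with
  | nil => simp [insortB, List.pairwise_cons]
  | cons y t ih =>
      simp only [insortB]
      obtain ⟨hy, ht⟩ := List.pairwise_cons.mp h
      split
      · rename_i hlt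
        refine List.pairwise_cons.mpr ⟨?_, ih ht⟩
        intro z hz
        rcases (insortB_mem t e z).mp hz with rfl | hz
        · exact lexLe_total _ _ hlt
        · exact hy z hz
      · rename_i hnlt
        refine List.pairwise_cons.mpr ⟨?_, h⟩
        intro z hz
        rcases List.mem_cons.mp hz with rfl | hz
        · exact lexLe_of_not_lt _ _ hnlt
        · exact lexLe_trans' (lexLe_of_not_lt _ _ hnlt) (hy z hz)

theorem lexLe_antisymm {a b : Int × Int} (h1 : lexLe a b) (h2 : lexLe b a) : a = b := by
  unfold lexLe at *
  have : a.1 = b.1 ∧ a.2 = b.2 := by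
    rcases h1 with h1 | ⟨e1, l1⟩ <;> rcases h2 with h2 | ⟨e2, l2⟩ <;> omega
  exact Prod.ext this.1 this.2


-- ---------- basic getD helpers ----------

theorem getD_set_self {α : Type} (l : List α) (i : Nat) (v d : α) (h : i < l.length) :
    (l.set i v).getD i d = v := by
  simp [List.getD_eq_getElem?_getD, h]

theorem getD_set_ne {α : Type} (l : List α) (i k : Nat) (v d : α) (h : i ≠ k) :
    (l.set i v).getD k d = l.getD k d := by
  simp [List.getD_eq_getElem?_getD, List.getElem?_set_ne h]

theorem exists_getD_of_mem {α : Type} (l : List α) (x : α) (d : α) (h : x ∈ l) :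
    ∃ i, i < l.length ∧ l.getD i d = x := by
  obtain ⟨i, hi, hx⟩ := List.mem_iff_getElem.mp h
  exact ⟨i, hi, by rw [List.getD_eq_getElem?_getD, List.getElem?_eq_getElem hi]; exact hx⟩

theorem getD_map_fst (ps : List (Nat × Int)) (i : Nat) (h : i < ps.length) :
    (ps.map Prod.fst).getD i 0 = (ps.getD i ((0 : Nat), (0 : Int))).1 := by
  rw [List.getD_eq_getElem?_getD, List.getD_eq_getElem?_getD,
    List.getElem?_eq_getElem (by simpa using h), List.getElem?_eq_getElem h]
  simp

theorem getD_map_snd (ps : List (Nat × Int)) (i : Nat) (h : i < ps.length) :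
    (ps.map Prod.snd).getD i 0 = (ps.getD i ((0 : Nat), (0 : Int))).2 := by
  rw [List.getD_eq_getElem?_getD, List.getD_eq_getElem?_getD,
    List.getElem?_eq_getElem (by simpa using h), List.getElem?_eq_getElem h]
  simp

theorem fst_mono_getD (ps : List (Nat × Int)) (hm : (ps.map Prod.fst).Pairwise (· < ·))
    (i j : Nat) (hij : i < j) (hj : j < ps.length) :
    (ps.getD i ((0 : Nat), (0 : Int))).1 < (ps.getD j ((0 : Nat), (0 : Int))).1 := by
  rw [← getD_map_fst _ _ (lt_trans hij hj), ← getD_map_fst _ _ hj]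
  have hlen : (ps.map Prod.fst).length = ps.length := by simp
  have := (List.pairwise_iff_getElem.mp hm) i j (by omega) (by omega) hij
  rw [List.getD_eq_getElem?_getD, List.getD_eq_getElem?_getD,
    List.getElem?_eq_getElem (by omega), List.getElem?_eq_getElem (by omega)]
  simpa using this

-- ---------- pairEv lemmas ----------

theorem pairEv_length : ∀ (ps : List (Nat × Int)), (pairEv ps).length = ps.length - 1
  | [] => rfl
  | [_] => rfl
  | (p, a) :: (q, b) :: t => by
      simp [pairEv, pairEv_length ((q, b) :: t)]

theorem pairEv_getD : ∀ (ps : List (Nat × Int)) (i : Nat), i + 1 < ps.length →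
    (pairEv ps).getD i ((0 : Int), (0 : Int)) =
      ((ps.getD i ((0 : Nat), (0 : Int))).2 + (ps.getD (i + 1) ((0 : Nat), (0 : Int))).2,
       ((ps.getD i ((0 : Nat), (0 : Int))).1 : Int))
  | (p, a) :: (q, b) :: t, 0, _ => by simp [pairEv]
  | (p, a) :: (q, b) :: t, i + 1, h => by
      simpa [pairEv] using pairEv_getD ((q, b) :: t) i (by simpa using h)
  | [], i, h => by simp at h
  | [_], i, h => by simp at h

theorem pairEv_split : ∀ (l1 : List (Nat × Int)) (x y : Nat × Int) (l2 : List (Nat × Int)),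
    pairEv (l1 ++ x :: y :: l2) = pairEv (l1 ++ [x]) ++ (x.2 + y.2, (x.1 : Int)) :: pairEv (y :: l2)
  | [], x, y, l2 => by cases x; cases y; simp [pairEv]
  | [a], x, y, l2 => by cases a; cases x; cases y; simp [pairEv]
  | a :: b :: l1, x, y, l2 => by
      have ih := pairEv_split (b :: l1) x y l2
      cases a; cases b
      simp only [List.cons_append, pairEv] at ih ⊢
      rw [ih]

theorem pairEv_concat : ∀ (l1 : List (Nat × Int)) (u w : Nat × Int),
    pairEv ((l1 ++ [u]) ++ [w]) = pairEv (l1 ++ [u]) ++ [(u.2 + w.2, (u.1 : Int))]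
  | [], u, w => by cases u; cases w; simp [pairEv]
  | a :: l1, u, w => by
      have ih := pairEv_concat l1 u w
      cases a
      cases l1 with
      | nil => cases u; cases w; simp [pairEv]
      | cons b l1' =>
          cases b
          simp only [List.cons_append, pairEv] at ih ⊢
          rw [ih]

theorem pairEv_mem_adj : ∀ (ps : List (Nat × Int)) (e : Int × Int), e ∈ pairEv ps →
    ∃ l1 x y l2, ps = l1 ++ x :: y :: l2 ∧ e = (x.2 + y.2, (x.1 : Int))
  | (p, a) :: (q, b) :: t, e, he => by
      simp only [pairEv, List.mem_cons] at he
      rcases he with rfl | he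
      · exact ⟨[], (p, a), (q, b), t, rfl, rfl⟩
      · obtain ⟨l1, x, y, l2, heq, hee⟩ := pairEv_mem_adj ((q, b) :: t) e he
        exact ⟨(p, a) :: l1, x, y, l2, by rw [List.cons_append, ← heq], hee⟩
  | [], e, he => by simp [pairEv] at he
  | [_], e, he => by simp [pairEv] at he

-- ---------- NxtOk / PrvFrom lemmas ----------

theorem NxtOk_congr (nxt nxt' : List Int) : ∀ (ps : List (Nat × Int)),
    (∀ pr ∈ ps, nxt'.getD pr.1 0 = nxt.getD pr.1 0) → NxtOk nxt ps → NxtOk nxt' ps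
  | [], _, _ => trivial
  | [(p, a)], h, hn => by
      simp only [NxtOk] at hn ⊢
      rw [h (p, a) (by simp)]; exact hn
  | (p, a) :: (q, b) :: t, h, hn => by
      simp only [NxtOk] at hn ⊢
      refine ⟨by rw [h (p, a) (by simp)]; exact hn.1, ?_⟩
      exact NxtOk_congr nxt nxt' ((q, b) :: t) (fun pr hpr => h pr (by simp [hpr])) hn.2

theorem NxtOk_tail (nxt : List Int) (w : Nat × Int) (t : List (Nat × Int))
    (h : NxtOk nxt (w :: t)) : NxtOk nxt t := by
  cases w with
  | mk p a =>
    cases t with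
    | nil => trivial
    | cons y t' =>
        cases y with
        | mk q b => exact h.2

theorem NxtOk_suffix (nxt : List Int) : ∀ (l1 rest : List (Nat × Int)),
    NxtOk nxt (l1 ++ rest) → NxtOk nxt rest
  | [], rest, h => h
  | w :: l1, rest, h => NxtOk_suffix nxt l1 rest (NxtOk_tail nxt w _ h)

theorem nxt_getD_adj (nxt : List Int) (l1 : List (Nat × Int)) (x y : Nat × Int)
    (l2 : List (Nat × Int)) (h : NxtOk nxt (l1 ++ x :: y :: l2)) :
    nxt.getD x.1 0 = (y.1 : Int) := by
  have := NxtOk_suffix nxt l1 _ h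
  cases x; cases y
  exact this.1

theorem nxt_getD_last (nxt : List Int) (l1 : List (Nat × Int)) (x : Nat × Int)
    (h : NxtOk nxt (l1 ++ [x])) : nxt.getD x.1 0 = -1 := by
  have := NxtOk_suffix nxt l1 _ h
  cases x
  exact this

theorem PrvFrom_congr (prv prv' : List Int) : ∀ (ps : List (Nat × Int)) (x0 : Int),
    (∀ pr ∈ ps, prv'.getD pr.1 0 = prv.getD pr.1 0) → PrvFrom prv x0 ps → PrvFrom prv' x0 ps
  | [], _, _, _ => trivial
  | (p, a) :: t, x0, h, hp => by
      simp only [PrvFrom] at hp ⊢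
      refine ⟨by rw [h (p, a) (by simp)]; exact hp.1, ?_⟩
      exact PrvFrom_congr prv prv' t _ (fun pr hpr => h pr (by simp [hpr])) hp.2

/-- position of the last element of l1, or x0 when l1 is empty -/
def lastPosD (l1 : List (Nat × Int)) (x0 : Int) : Int :=
  match l1.getLast? with
  | none => x0
  | some w => (w.1 : Int)

theorem lastPosD_concat (l1 : List (Nat × Int)) (w : Nat × Int) (x0 : Int) :
    lastPosD (l1 ++ [w]) x0 = (w.1 : Int) := by
  simp [lastPosD]

theorem prv_at (prv : List Int) : ∀ (l1 : List (Nat × Int)) (x0 : Int) (x : Nat × Int)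
    (l2 : List (Nat × Int)), PrvFrom prv x0 (l1 ++ x :: l2) →
    prv.getD x.1 0 = lastPosD l1 x0
  | [], x0, x, l2, h => by
      cases x
      exact h.1
  | w :: l1, x0, x, l2, h => by
      cases w with
      | mk wp wa =>
        have := prv_at prv l1 (wp : Int) x l2 h.2
        rw [this]
        cases l1 with
        | nil => simp [lastPosD]
        | cons u l1' =>
            obtain ⟨w, h'⟩ : ∃ w, (u :: l1').getLast? = some w := ⟨_, List.getLast?_cons⟩
            unfold lastPosD
            rw [List.getLast?_cons_cons, h']


-- generic versions of the positional getD lemmas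
theorem getD_at_lenP {α : Type} : ∀ (A : List α) (b : α) (C : List α) (d : α),
    (A ++ b :: C).getD A.length d = b
  | [], _, _, _ => rfl
  | a :: A, b, C, d => by simpa using getD_at_lenP A b C d

theorem getD_at_len_succP {α : Type} : ∀ (A : List α) (b c : α) (C : List α) (d : α),
    (A ++ b :: c :: C).getD (A.length + 1) d = c
  | [], _, _, _, _ => rfl
  | a :: A, b, c, C, d => by simpa using getD_at_len_succP A b c C d

-- ---------- validity test characterisation ----------

theorem check_iff (m : Nat) (vals : List Int) (alive : List Bool) (nxt prv : List Int)
    (ps : List (Nat × Int)) (inv : InvB m vals alive nxt prv ps) (s p : Int) (hp : 0 ≤ p) :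
    checkB vals alive nxt s p = true ↔ (s, p) ∈ pairEv ps := by
  constructor
  · intro h
    unfold checkB at h
    simp only [Bool.and_eq_true, decide_eq_true_eq, beq_iff_eq] at h
    obtain ⟨⟨halv, hq⟩, hsum⟩ := h
    rw [PySem.List.pyGetD_of_nonneg _ _ hp] at halv
    have hmem := (inv.halive p.toNat).mp halv
    obtain ⟨pr, hpr, hfst⟩ := List.mem_map.mp hmem
    obtain ⟨l1, l2, hps⟩ := List.append_of_mem hpr
    cases l2 with
    | nil =>
        exfalso
        have := nxt_getD_last nxt l1 pr (by rw [← hps]; exact inv.hnxt)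
        rw [PySem.List.pyGetD_of_nonneg _ _ hp, ← hfst, this] at hq
        omega
    | cons y l2' =>
        have hadj := nxt_getD_adj nxt l1 pr y l2' (by rw [← hps]; exact inv.hnxt)
        have hqv : PySem.List.pyGetD nxt p 0 = (y.1 : Int) := by
          rw [PySem.List.pyGetD_of_nonneg _ _ hp, ← hfst, hadj]
        have hvp : PySem.List.pyGetD vals p 0 = pr.2 := by
          rw [PySem.List.pyGetD_of_nonneg _ _ hp, ← hfst]
          exact inv.hvals pr hpr
        have hvq : PySem.List.pyGetD vals (PySem.List.pyGetD nxt p 0) 0 = y.2 := by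
          rw [hqv, PySem.List.pyGetD_natCast]
          exact inv.hvals y (by rw [hps]; simp)
        rw [hvp, hvq] at hsum
        have hpe : p = (pr.1 : Int) := by omega
        have : (pr.2 + y.2, (pr.1 : Int)) ∈ pairEv ps := by
          rw [hps, pairEv_split]
          simp
        rw [← hsum, hpe]
        exact this
  · intro h
    obtain ⟨l1, x, y, l2, hps, he⟩ := pairEv_mem_adj ps (s, p) h
    have hs : s = x.2 + y.2 := by
      have := congrArg Prod.fst he; simpa using this
    have hpe : p = (x.1 : Int) := by
      have := congrArg Prod.snd he; simpa using this
    have hxmem : x ∈ ps := by rw [hps]; simp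
    have hymem : y ∈ ps := by rw [hps]; simp
    have hadj := nxt_getD_adj nxt l1 x y l2 (by rw [← hps]; exact inv.hnxt)
    unfold checkB
    simp only [Bool.and_eq_true, decide_eq_true_eq, beq_iff_eq]
    have hqv : PySem.List.pyGetD nxt p 0 = (y.1 : Int) := by
      rw [hpe, PySem.List.pyGetD_natCast, hadj]
    refine ⟨⟨?_, by rw [hqv]; exact Int.natCast_nonneg _⟩, ?_⟩
    · rw [hpe, PySem.List.pyGetD_natCast]
      exact (inv.halive x.1).mpr (List.mem_map.mpr ⟨x, hxmem, rfl⟩)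
    · rw [hqv, hpe, PySem.List.pyGetD_natCast, PySem.List.pyGetD_natCast,
        inv.hvals x hxmem, inv.hvals y hymem]
      omega

-- ---------- the decomposition at the argmin is the lex-minimal event ----------

theorem emin_min (ps : List (Nat × Int)) (hm : (ps.map Prod.fst).Pairwise (· < ·))
    (l1 : List (Nat × Int)) (x y : Nat × Int) (l2 : List (Nat × Int))
    (hps : ps = l1 ++ x :: y :: l2)
    (hl1 : l1.length = argminSums (pairSums (ps.map Prod.snd))) :
    ∀ e ∈ pairEv ps, lexLe (x.2 + y.2, (x.1 : Int)) e := by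
  intro e he
  have hlen : 2 ≤ ps.length := by rw [hps]; simp; omega
  have hsums_len : (pairSums (ps.map Prod.snd)).length = ps.length - 1 := by
    rw [pairSums_length]; simp
  have hsne : pairSums (ps.map Prod.snd) ≠ [] := by
    intro hnil; rw [hnil] at hsums_len; simp at hsums_len; omega
  obtain ⟨hjlt, hmin, hfirst⟩ := argminSums_spec _ hsne
  rw [← hl1] at hjlt hmin hfirst
  rw [hsums_len] at hjlt
  -- index of e
  obtain ⟨i, hi, hie⟩ := exists_getD_of_mem _ e ((0 : Int), (0 : Int)) he
  rw [pairEv_length] at hi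
  have hi1 : i + 1 < ps.length := by omega
  have hj1 : l1.length + 1 < ps.length := by omega
  -- getD values at the decomposition
  have hgx : ps.getD l1.length ((0 : Nat), (0 : Int)) = x := by
    rw [hps]; exact getD_at_lenP l1 x (y :: l2) _
  have hgy : ps.getD (l1.length + 1) ((0 : Nat), (0 : Int)) = y := by
    rw [hps]; exact getD_at_len_succP l1 x y l2 _
  have hevj : (pairEv ps).getD l1.length ((0 : Int), (0 : Int)) = (x.2 + y.2, (x.1 : Int)) := by
    rw [pairEv_getD ps l1.length hj1, hgx, hgy]
  -- sums at indices equal first components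
  have hsum_at : ∀ k, k + 1 < ps.length →
      (pairSums (ps.map Prod.snd)).getD k 0 = ((pairEv ps).getD k ((0 : Int), (0 : Int))).1 := by
    intro k hk
    rw [pairSums_getD _ k (by simpa using hk), pairEv_getD ps k hk,
      getD_map_snd _ _ (by omega), getD_map_snd _ _ (by omega)]
  rcases Nat.lt_trichotomy i l1.length with hlt | heq | hgt
  · have h1 := hfirst i hlt
    rw [hsum_at l1.length hj1, hsum_at i hi1, hevj] at h1
    rw [← hie]
    exact Or.inl (by simpa using h1)
  · rw [← hie, heq, hevj]
    exact Or.inr ⟨rfl, le_refl _⟩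
  · have h2 := hmin i (by rw [hsums_len]; omega)
    rw [hsum_at l1.length hj1, hsum_at i hi1, hevj] at h2
    rcases lt_or_eq_of_le h2 with hstrict | heqs
    · rw [← hie]
      exact Or.inl (by simpa using hstrict)
    · right
      rw [← hie]
      refine ⟨by simpa using heqs, ?_⟩
      rw [pairEv_getD ps i hi1]
      have := fst_mono_getD ps hm l1.length i hgt (by omega)
      rw [hgx] at this
      simp only []
      exact_mod_cast le_of_lt this

-- ---------- the scan pops exactly the minimal current pair ----------

theorem popValid_spec (m : Nat) (vals : List Int) (alive : List Bool) (nxt prv : List Int)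
    (ps : List (Nat × Int)) (inv : InvB m vals alive nxt prv ps)
    (l1 : List (Nat × Int)) (x y : Nat × Int) (l2 : List (Nat × Int))
    (hps : ps = l1 ++ x :: y :: l2)
    (hmin : ∀ e ∈ pairEv ps, lexLe (x.2 + y.2, (x.1 : Int)) e) :
    ∀ (events : List (Int × Int)), events.Pairwise lexLe → (∀ e ∈ events, 0 ≤ e.2) →
    (∀ e ∈ pairEv ps, e ∈ events) →
    ∃ rest, popValidB vals alive nxt events = some (x.2 + y.2, (x.1 : Int), (y.1 : Int), rest) ∧
      (∀ e ∈ pairEv ps, e ≠ (x.2 + y.2, (x.1 : Int)) → e ∈ rest) ∧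
      rest.Pairwise lexLe ∧ (∀ e ∈ rest, 0 ≤ e.2) := by
  have hemin : (x.2 + y.2, (x.1 : Int)) ∈ pairEv ps := by
    rw [hps, pairEv_split]; simp
  intro events
  induction events with
  | nil =>
      intro _ _ hall
      exact absurd (hall _ hemin) (by simp)
  | cons e0 rest0 ih =>
      intro hsort hnn hall
      obtain ⟨s0, p0⟩ := e0
      obtain ⟨hhead, htail⟩ := List.pairwise_cons.mp hsort
      by_cases hc : checkB vals alive nxt s0 p0 = true
      · have hmem0 : (s0, p0) ∈ pairEv ps :=
          (check_iff m vals alive nxt prv ps inv s0 p0 (hnn _ List.mem_cons_self)).mp hc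
        have heq0 : (s0, p0) = (x.2 + y.2, (x.1 : Int)) := by
          refine lexLe_antisymm ?_ (hmin _ hmem0)
          rcases List.mem_cons.mp (hall _ hemin) with h | h
          · rw [← h]; exact Or.inr ⟨rfl, le_refl _⟩
          · exact hhead _ h
        have hq : PySem.List.pyGetD nxt p0 0 = (y.1 : Int) := by
          have hp0 : p0 = (x.1 : Int) := by
            have := congrArg Prod.snd heq0; simpa using this
          rw [hp0, PySem.List.pyGetD_natCast]
          exact nxt_getD_adj nxt l1 x y l2 (by rw [← hps]; exact inv.hnxt)
        refine ⟨rest0, ?_, ?_, htail, fun e he => hnn e (List.mem_cons_of_mem _ he)⟩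
        · rw [popValidB, if_pos hc, hq]
          rw [show s0 = x.2 + y.2 from by have := congrArg Prod.fst heq0; simpa using this,
            show p0 = (x.1 : Int) from by have := congrArg Prod.snd heq0; simpa using this]
        · intro e he hne
          rcases List.mem_cons.mp (hall e he) with h | h
          · exact absurd (h.trans heq0) hne
          · exact h
      · have hnotmem : (s0, p0) ∉ pairEv ps := fun h =>
          hc ((check_iff m vals alive nxt prv ps inv s0 p0 (hnn _ List.mem_cons_self)).mpr h)
        obtain ⟨rest, h1, h2, h3, h4⟩ := ih htail
          (fun e he => hnn e (List.mem_cons_of_mem _ he))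
          (fun e he => by
            rcases List.mem_cons.mp (hall e he) with h | h
            · exact absurd (h ▸ he) hnotmem
            · exact h)
        exact ⟨rest, by rw [popValidB, if_neg hc]; exact h1, h2, h3, h4⟩


-- ---------- position facts from the strict monotonicity ----------

theorem pairwise_facts (l1 : List (Nat × Int)) (x y : Nat × Int) (l2 : List (Nat × Int))
    (h : ((l1 ++ x :: y :: l2).map Prod.fst).Pairwise (· < ·)) :
    (∀ w ∈ l1, w.1 < x.1) ∧ x.1 < y.1 ∧ (∀ z ∈ l2, y.1 < z.1) ∧
    (∀ w ∈ l1, w.1 < y.1) ∧ (∀ z ∈ l2, x.1 < z.1) ∧ (∀ w ∈ l1, ∀ z ∈ l2, w.1 < z.1) := by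
  rw [List.map_append, List.map_cons, List.map_cons, List.pairwise_append] at h
  obtain ⟨h1, h2, hcross⟩ := h
  obtain ⟨hx, h2'⟩ := List.pairwise_cons.mp h2
  obtain ⟨hy, _⟩ := List.pairwise_cons.mp h2'
  refine ⟨?_, ?_, ?_, ?_, ?_, ?_⟩
  · intro w hw
    exact hcross _ (List.mem_map.mpr ⟨w, hw, rfl⟩) _ (by simp)
  · exact hx _ (by simp)
  · intro z hz
    exact hy _ (List.mem_map.mpr ⟨z, hz, rfl⟩)
  · intro w hw
    exact hcross _ (List.mem_map.mpr ⟨w, hw, rfl⟩) _ (by simp)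
  · intro z hz
    exact hx _ (by simp [List.mem_map.mpr ⟨z, hz, rfl⟩])
  · intro w hw z hz
    exact hcross _ (List.mem_map.mpr ⟨w, hw, rfl⟩) _ (by simp [List.mem_map.mpr ⟨z, hz, rfl⟩])

theorem pairEv_snd_mem (L : List (Nat × Int)) (e : Int × Int) (he : e ∈ pairEv L) :
    ∃ u ∈ L, e.2 = (u.1 : Int) := by
  obtain ⟨l1, x, y, l2, hL, hee⟩ := pairEv_mem_adj L e he
  exact ⟨x, by rw [hL]; simp, by rw [hee]⟩

-- ---------- the linked-list updates preserve the chain invariants ----------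

theorem NxtOk_merge (nxt : List Int) (v r : Int) (x y : Nat × Int) (l2 : List (Nat × Int))
    (hxlen : x.1 < nxt.length)
    (hr : r = match l2 with | [] => (-1 : Int) | z :: _ => (z.1 : Int))
    (hne2 : ∀ w ∈ l2, w.1 ≠ x.1) :
    ∀ l1 : List (Nat × Int), (∀ w ∈ l1, w.1 ≠ x.1) → NxtOk nxt (l1 ++ x :: y :: l2) →
    NxtOk (nxt.set x.1 r) (l1 ++ (x.1, v) :: l2) := by
  intro l1
  induction l1 with
  | nil =>
      intro _ hn
      obtain ⟨p, a⟩ := x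
      obtain ⟨q, b⟩ := y
      simp only [List.nil_append] at hn ⊢
      obtain ⟨hlink, hn2⟩ := hn
      cases l2 with
      | nil =>
          show (nxt.set p r).getD p 0 = -1
          rw [getD_set_self _ _ _ _ (by simpa using hxlen), hr]
      | cons z l2' =>
          refine ⟨?_, ?_⟩
          · rw [getD_set_self _ _ _ _ (by simpa using hxlen), hr]
          · refine NxtOk_congr nxt _ (z :: l2') ?_ (NxtOk_tail nxt (q, b) _ hn2)
            intro pr hpr
            exact getD_set_ne _ _ _ _ _ (fun hpe => hne2 pr hpr (by simpa using hpe.symm))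
  | cons w l1' ih =>
      intro hne1 hn
      have hwx : w.1 ≠ x.1 := hne1 w List.mem_cons_self
      have hne1' : ∀ u ∈ l1', u.1 ≠ x.1 := fun u hu => hne1 u (List.mem_cons_of_mem _ hu)
      obtain ⟨wp, wa⟩ := w
      cases l1' with
      | nil =>
          obtain ⟨p, a⟩ := x
          obtain ⟨q, b⟩ := y
          simp only [List.nil_append, List.cons_append] at hn ⊢
          refine ⟨?_, ?_⟩
          · rw [getD_set_ne _ _ _ _ _ (fun hpe => hwx (by simpa using hpe.symm))]
            exact hn.1
          · exact ih hne1' hn.2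
      | cons u l1'' =>
          obtain ⟨up, ua⟩ := u
          simp only [List.cons_append] at hn ⊢
          refine ⟨?_, ?_⟩
          · rw [getD_set_ne _ _ _ _ _ (fun hpe => hwx (by simpa using hpe.symm))]
            exact hn.1
          · exact ih hne1' hn.2

theorem PrvFrom_merge (prv : List Int) (v : Int) (x y : Nat × Int) (l2 : List (Nat × Int))
    (prv1 : List Int)
    (hp1 : prv1 = match l2 with | [] => prv | z :: _ => prv.set z.1 (x.1 : Int))
    (hzlen : ∀ z ∈ l2, z.1 < prv.length) :
    ∀ (l1 : List (Nat × Int)) (x0 : Int),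
    ((l1 ++ x :: y :: l2).map Prod.fst).Pairwise (· < ·) →
    PrvFrom prv x0 (l1 ++ x :: y :: l2) →
    PrvFrom prv1 x0 (l1 ++ (x.1, v) :: l2) := by
  intro l1
  induction l1 with
  | nil =>
      intro x0 hm h
      obtain ⟨-, hxy, hyz, -, hxz, -⟩ := pairwise_facts [] x y l2 hm
      obtain ⟨p, a⟩ := x
      obtain ⟨q, b⟩ := y
      simp only [List.nil_append] at h ⊢
      obtain ⟨hp0, h2⟩ := h
      cases l2 with
      | nil =>
          rw [hp1]
          exact ⟨hp0, trivial⟩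
      | cons z l2' =>
          obtain ⟨zp, zc⟩ := z
          rw [hp1]
          refine ⟨?_, ?_, ?_⟩
          · rw [getD_set_ne _ _ _ _ _ (fun hpe => by
              have := hxz (zp, zc) List.mem_cons_self; simp at hpe; omega)]
            exact hp0
          · rw [getD_set_self _ _ _ _ (by simpa using hzlen (zp, zc) List.mem_cons_self)]
          · have h3 : PrvFrom prv (zp : Int) l2' := h2.2.2
            refine PrvFrom_congr prv _ l2' _ ?_ h3
            intro pr hpr
            refine getD_set_ne _ _ _ _ _ (fun hpe => ?_)
            have hmono' : (([] ++ (q, b) :: (zp, zc) :: l2').map Prod.fst).Pairwise (· < ·) := by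
              simp only [List.nil_append, List.map_cons] at hm ⊢
              exact (List.pairwise_cons.mp hm).2
            obtain ⟨-, -, hz2, -, -, -⟩ := pairwise_facts [] (q, b) (zp, zc) l2' hmono'
            have := hz2 pr hpr
            omega
  | cons w l1' ih =>
      intro x0 hm h
      obtain ⟨wp, wa⟩ := w
      simp only [List.cons_append] at h ⊢
      obtain ⟨hw0, h2⟩ := h
      have hm' : ((l1' ++ x :: y :: l2).map Prod.fst).Pairwise (· < ·) := by
        simp only [List.cons_append, List.map_cons] at hm
        exact (List.pairwise_cons.mp hm).2
      refine ⟨?_, ih wp hm' h2⟩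
      cases l2 with
      | nil => rw [hp1]; exact hw0
      | cons z l2' =>
          rw [hp1]
          rw [getD_set_ne _ _ _ _ _ (fun hpe => ?_)]
          · exact hw0
          · obtain ⟨-, -, -, -, -, hcross⟩ := pairwise_facts ((wp, wa) :: l1') x y (z :: l2') (by simpa using hm)
            have := hcross (wp, wa) List.mem_cons_self z List.mem_cons_self
            simp at hpe
            omega


theorem InvB_merge (m : Nat) (vals : List Int) (alive : List Bool) (nxt prv : List Int)
    (ps l1 : List (Nat × Int)) (x y : Nat × Int) (l2 : List (Nat × Int))
    (inv : InvB m vals alive nxt prv ps) (hps : ps = l1 ++ x :: y :: l2)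
    (prv1 : List Int)
    (hp1nil : l2 = [] → prv1 = prv)
    (hp1cons : ∀ z l2', l2 = z :: l2' → prv1 = prv.set z.1 (x.1 : Int))
    (r : Int) (hrnil : l2 = [] → r = -1)
    (hrcons : ∀ z l2', l2 = z :: l2' → r = (z.1 : Int)) :
    InvB m (vals.set x.1 (x.2 + y.2)) (alive.set y.1 false) (nxt.set x.1 r) prv1
      (l1 ++ (x.1, x.2 + y.2) :: l2) := by
  obtain ⟨h1, hxy, hyz, h1y, hxz, hcross⟩ := pairwise_facts l1 x y l2 (hps ▸ inv.hmono)
  have hxps : x ∈ ps := by rw [hps]; simp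
  have hyps : y ∈ ps := by rw [hps]; simp
  have hxm : x.1 < m := inv.hlt x hxps
  have hym : y.1 < m := inv.hlt y hyps
  have hp1len : prv1.length = prv.length := by
    cases l2 with
    | nil => rw [hp1nil rfl]
    | cons z l2' => rw [hp1cons z l2' rfl]; simp
  refine ⟨by simp [inv.hvl], by simp [inv.hal], by simp [inv.hnl], by rw [hp1len, inv.hpl], ?_, ?_, ?_, ?_, ?_, ?_⟩
  · -- monotone positions: sublist of the original
    have hsub : List.Sublist ((l1 ++ (x.1, x.2 + y.2) :: l2).map Prod.fst) (ps.map Prod.fst) := by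
      rw [hps, List.map_append, List.map_append, List.map_cons, List.map_cons, List.map_cons]
      refine List.Sublist.append_left ?_ _
      exact List.Sublist.cons₂ _ (List.sublist_cons_self _ _)
    exact inv.hmono.sublist hsub
  · intro pr hpr
    rcases List.mem_append.mp hpr with h | h
    · exact inv.hlt pr (by rw [hps]; exact List.mem_append_left _ h)
    · rcases List.mem_cons.mp h with rfl | h
      · exact hxm
      · exact inv.hlt pr (by rw [hps]; simp [h])
  · intro pr hpr
    rcases List.mem_append.mp hpr with h | h
    · rw [getD_set_ne _ _ _ _ _ (h1 pr h).ne']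
      exact inv.hvals pr (by rw [hps]; exact List.mem_append_left _ h)
    · rcases List.mem_cons.mp h with rfl | h
      · exact getD_set_self _ _ _ _ (by rw [inv.hvl]; exact hxm)
      · rw [getD_set_ne _ _ _ _ _ (hxz pr h).ne]
        exact inv.hvals pr (by rw [hps]; simp [h])
  · intro t
    by_cases ht : t = y.1
    · subst ht
      rw [getD_set_self _ _ _ _ (by rw [inv.hal]; exact hym)]
      constructor
      · intro h; exact absurd h (by simp)
      · intro h
        exfalso
        rw [List.map_append, List.map_cons] at h
        rcases List.mem_append.mp h with h | h
        · obtain ⟨w, hw, hww⟩ := List.mem_map.mp h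
          exact absurd hww (h1y w hw).ne
        · rcases List.mem_cons.mp h with h | h
          · exact absurd h.symm hxy.ne
          · obtain ⟨z, hz, hzz⟩ := List.mem_map.mp h
            exact absurd hzz (hyz z hz).ne'
    · rw [getD_set_ne _ _ _ _ _ (fun h => ht h.symm)]
      rw [inv.halive t, hps]
      rw [List.map_append, List.map_cons, List.map_cons, List.map_append, List.map_cons]
      simp only [List.mem_append, List.mem_cons]
      constructor
      · rintro (h | h | h | h)
        · exact Or.inl h
        · exact Or.inr (Or.inl h)
        · exact absurd h ht
        · exact Or.inr (Or.inr h)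
      · rintro (h | h | h)
        · exact Or.inl h
        · exact Or.inr (Or.inl h)
        · exact Or.inr (Or.inr (Or.inr h))
  · cases l2 with
    | nil =>
        exact NxtOk_merge nxt (x.2 + y.2) r x y [] (by rw [inv.hnl]; exact hxm) (hrnil rfl)
          (by simp) l1 (fun w hw => (h1 w hw).ne) (hps ▸ inv.hnxt)
    | cons z l2' =>
        exact NxtOk_merge nxt (x.2 + y.2) r x y (z :: l2') (by rw [inv.hnl]; exact hxm)
          (hrcons z l2' rfl) (fun w hw => (hxz w hw).ne') l1 (fun w hw => (h1 w hw).ne)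
          (hps ▸ inv.hnxt)
  · cases l2 with
    | nil =>
        exact PrvFrom_merge prv (x.2 + y.2) x y [] prv1 (hp1nil rfl) (by simp)
          l1 (-1) (hps ▸ inv.hmono) (hps ▸ inv.hprv)
    | cons z l2' =>
        exact PrvFrom_merge prv (x.2 + y.2) x y (z :: l2') prv1 (hp1cons z l2' rfl)
          (fun u hu => by rw [inv.hpl]; exact inv.hlt u (by rw [hps]; simp [hu]))
          l1 (-1) (hps ▸ inv.hmono) (hps ▸ inv.hprv)


theorem pairEv_mem_append_left (l1 l2 : List (Nat × Int)) (e : Int × Int)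
    (he : e ∈ pairEv l1) : e ∈ pairEv (l1 ++ l2) := by
  obtain ⟨a, u, v, b, rfl, rfl⟩ := pairEv_mem_adj l1 e he
  rw [show (a ++ u :: v :: b) ++ l2 = a ++ u :: v :: (b ++ l2) by simp, pairEv_split]
  simp

theorem pairEv_mem_append_right (l1 l2 : List (Nat × Int)) (e : Int × Int)
    (he : e ∈ pairEv l2) : e ∈ pairEv (l1 ++ l2) := by
  obtain ⟨a, u, v, b, rfl, rfl⟩ := pairEv_mem_adj l2 e he
  rw [show l1 ++ (a ++ u :: v :: b) = (l1 ++ a) ++ u :: v :: b by simp, pairEv_split]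
  simp

theorem stepB_eq (vals : List Int) (alive : List Bool) (nxt prv : List Int)
    (events : List (Int × Int)) (s p q : Int) (rest : List (Int × Int))
    (hpop : popValidB vals alive nxt events = some (s, p, q, rest)) :
    stepB (vals, alive, nxt, prv, events) =
      (let vals1 := PySem.List.pySetD vals p (PySem.List.pyGetD vals p 0 + PySem.List.pyGetD vals q 0)
       let alive1 := PySem.List.pySetD alive q false
       let r := PySem.List.pyGetD nxt q 0
       let nxt1 := PySem.List.pySetD nxt p r
       let prv1 := if 0 ≤ r then PySem.List.pySetD prv r p else prv
       let events2 := if 0 ≤ r then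
           insortB rest (PySem.List.pyGetD vals1 p 0 + PySem.List.pyGetD vals1 r 0, p)
         else rest
       let l := PySem.List.pyGetD prv1 p 0
       let events3 := if 0 ≤ l then
           insortB events2 (PySem.List.pyGetD vals1 l 0 + PySem.List.pyGetD vals1 p 0, l)
         else events2
       (vals1, alive1, nxt1, prv1, events3)) := by
  simp only [stepB, hpop]

theorem step_spec (m : Nat) (vals : List Int) (alive : List Bool) (nxt prv : List Int)
    (events : List (Int × Int)) (ps : List (Nat × Int))
    (inv : InvB m vals alive nxt prv ps) (ev : EvOk events ps) (h2 : 2 ≤ ps.length) :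
    ∃ ps', InvB m (stepB (vals, alive, nxt, prv, events)).1
        (stepB (vals, alive, nxt, prv, events)).2.1
        (stepB (vals, alive, nxt, prv, events)).2.2.1
        (stepB (vals, alive, nxt, prv, events)).2.2.2.1 ps' ∧
      EvOk (stepB (vals, alive, nxt, prv, events)).2.2.2.2 ps' ∧
      ps'.map Prod.snd = specStep (ps.map Prod.snd) ∧
      ps'.length + 1 = ps.length ∧
      (ps'.map Prod.fst).head? = (ps.map Prod.fst).head? := by
  have hslen : (pairSums (ps.map Prod.snd)).length = ps.length - 1 := by
    rw [pairSums_length]; simp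
  have hsne : pairSums (ps.map Prod.snd) ≠ [] := by
    intro h; rw [h] at hslen; simp at hslen; omega
  obtain ⟨hjlt, -, -⟩ := argminSums_spec _ hsne
  rw [hslen] at hjlt
  obtain ⟨l1, x, y, l2, hps, hl1⟩ := decompP (argminSums (pairSums (ps.map Prod.snd))) ps (by omega)
  have hmin := emin_min ps inv.hmono l1 x y l2 hps hl1
  obtain ⟨rest, hpop, hrest, hrs, hrn⟩ :=
    popValid_spec m vals alive nxt prv ps inv l1 x y l2 hps hmin events ev.hsort ev.hnn ev.hmem
  obtain ⟨h1, hxy, hyz, h1y, hxz, hcross⟩ := pairwise_facts l1 x y l2 (hps ▸ inv.hmono)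
  have hxps : x ∈ ps := by rw [hps]; simp
  have hyps : y ∈ ps := by rw [hps]; simp
  have hxm : x.1 < m := inv.hlt x hxps
  have hym : y.1 < m := inv.hlt y hyps
  have hvx : vals.getD x.1 0 = x.2 := inv.hvals x hxps
  have hvy : vals.getD y.1 0 = y.2 := inv.hvals y hyps
  have hvlen : x.1 < vals.length := by rw [inv.hvl]; exact hxm
  have hv1self : (vals.set x.1 (x.2 + y.2)).getD x.1 0 = x.2 + y.2 := getD_set_self _ _ _ _ hvlen
  have hprvx : prv.getD x.1 0 = lastPosD l1 (-1) :=
    prv_at prv l1 (-1) x (y :: l2) (by rw [← hps]; exact inv.hprv)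
  -- common: the merged abstract list
  refine ⟨l1 ++ (x.1, x.2 + y.2) :: l2, ?_⟩
  have hspec : (l1 ++ (x.1, x.2 + y.2) :: l2).map Prod.snd = specStep (ps.map Prod.snd) := by
    have hjj : argminSums (pairSums (ps.map Prod.snd)) = (l1.map Prod.snd).length := by
      rw [← hl1]; simp
    simp only [specStep]
    rw [hjj, show ps.map Prod.snd = l1.map Prod.snd ++ x.2 :: y.2 :: l2.map Prod.snd by
      rw [hps]; simp]
    rw [getD_at_len, getD_at_len_succ, merge_eq]
    simp
  have hlen' : (l1 ++ (x.1, x.2 + y.2) :: l2).length + 1 = ps.length := by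
    rw [hps]; simp only [List.length_append, List.length_cons]; omega
  have hhead : ((l1 ++ (x.1, x.2 + y.2) :: l2).map Prod.fst).head? = (ps.map Prod.fst).head? := by
    rw [hps]
    cases l1 with
    | nil => simp
    | cons w l1' => simp
  -- e ∈ pairEv l1 entries are old non-minimal events
  have hprefix : ∀ e ∈ pairEv l1, e ∈ rest := by
    intro e he
    refine hrest e ?_ ?_
    · rw [hps]; exact pairEv_mem_append_left l1 _ e he
    · obtain ⟨u, hu, hu2⟩ := pairEv_snd_mem l1 e he
      intro hee
      have : e.2 = ((x.1 : Nat) : Int) := by rw [hee]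
      rw [hu2] at this
      have : u.1 = x.1 := by exact_mod_cast this
      exact (h1 u hu).ne this
  have hsuffix : ∀ z l2', l2 = z :: l2' → ∀ e ∈ pairEv (z :: l2'), e ∈ rest := by
    intro z l2' hl2 e he
    refine hrest e ?_ ?_
    · rw [hps, hl2, show l1 ++ x :: y :: z :: l2' = (l1 ++ [x, y]) ++ z :: l2' by simp]
      exact pairEv_mem_append_right _ _ e he
    · obtain ⟨u, hu, hu2⟩ := pairEv_snd_mem (z :: l2') e he
      intro hee
      have : e.2 = ((x.1 : Nat) : Int) := by rw [hee]
      rw [hu2] at this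
      have heq : u.1 = x.1 := by exact_mod_cast this
      have : x.1 < u.1 := by
        rcases List.mem_cons.mp hu with rfl | hu'
        · exact hxz u (hl2 ▸ List.mem_cons_self)
        · exact hxz u (hl2 ▸ List.mem_cons_of_mem _ hu')
      omega
  cases l2 with
  | nil =>
      have hrq : nxt.getD y.1 0 = -1 :=
        nxt_getD_last nxt (l1 ++ [x]) y (by rw [show (l1 ++ [x]) ++ [y] = l1 ++ x :: y :: ([] : List (Nat × Int)) by simp, ← hps]; exact inv.hnxt)
      rcases List.eq_nil_or_concat' l1 with rfl | ⟨l1', w, rfl⟩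
      · -- l1 = [], l2 = []
        have hstep : stepB (vals, alive, nxt, prv, events) =
            (vals.set x.1 (x.2 + y.2), alive.set y.1 false, nxt.set x.1 (-1), prv, rest) := by
          rw [stepB_eq vals alive nxt prv events _ _ _ rest hpop]
          simp only [PySem.List.pyGetD_natCast, PySem.List.pySetD_natCast, hvx, hvy, hrq]
          simp only [if_neg (show ¬((0 : Int) ≤ -1) from by norm_num)]
          simp only [PySem.List.pyGetD_natCast, hprvx, lastPosD, List.getLast?_nil]
          simp only [if_neg (show ¬((0 : Int) ≤ -1) from by norm_num)]
        rw [hstep]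
        refine ⟨?_, ?_, hspec, hlen', hhead⟩
        · exact InvB_merge m vals alive nxt prv ps [] x y [] inv hps prv
            (fun _ => rfl) (fun z l2' h => by simp at h) (-1) (fun _ => rfl)
            (fun z l2' h => by simp at h)
        · exact ⟨hrs, hrn, by simp [pairEv]⟩
      · -- l1 = l1' ++ [w], l2 = []
        have hwne : w.1 ≠ x.1 := (h1 w (by simp)).ne
        have hvw : (vals.set x.1 (x.2 + y.2)).getD w.1 0 = w.2 := by
          rw [getD_set_ne _ _ _ _ _ (fun h => hwne h.symm)]
          exact inv.hvals w (by rw [hps]; simp)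
        have hstep : stepB (vals, alive, nxt, prv, events) =
            (vals.set x.1 (x.2 + y.2), alive.set y.1 false, nxt.set x.1 (-1), prv,
             insortB rest (w.2 + (x.2 + y.2), (w.1 : Int))) := by
          rw [stepB_eq vals alive nxt prv events _ _ _ rest hpop]
          simp only [PySem.List.pyGetD_natCast, PySem.List.pySetD_natCast, hvx, hvy, hrq]
          simp only [if_neg (show ¬((0 : Int) ≤ -1) from by norm_num)]
          simp only [PySem.List.pyGetD_natCast, hprvx, lastPosD_concat]
          simp only [if_pos (Int.natCast_nonneg w.1)]
          simp only [PySem.List.pyGetD_natCast, hvw, hv1self]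
        rw [hstep]
        refine ⟨?_, ?_, hspec, hlen', hhead⟩
        · exact InvB_merge m vals alive nxt prv ps (l1' ++ [w]) x y [] inv hps prv
            (fun _ => rfl) (fun z l2' h => by simp at h) (-1) (fun _ => rfl)
            (fun z l2' h => by simp at h)
        · refine ⟨insortB_pairwise _ _ hrs, ?_, ?_⟩
          · intro e he
            rcases (insortB_mem _ _ _).mp he with rfl | he
            · exact Int.natCast_nonneg _
            · exact hrn e he
          · intro e he
            rw [show (l1' ++ [w]) ++ [(x.1, x.2 + y.2)] = (l1' ++ [w]) ++ [(x.1, x.2 + y.2)] from rfl,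
              pairEv_concat l1' w (x.1, x.2 + y.2)] at he
            rcases List.mem_append.mp he with he | he
            · exact (insortB_mem _ _ _).mpr (Or.inr (hprefix e he))
            · rcases List.mem_cons.mp he with rfl | he
              · exact (insortB_mem _ _ _).mpr (Or.inl rfl)
              · simp at he
  | cons z l2' =>
      have hrq : nxt.getD y.1 0 = (z.1 : Int) :=
        nxt_getD_adj nxt (l1 ++ [x]) y z l2' (by rw [show (l1 ++ [x]) ++ y :: z :: l2' = l1 ++ x :: y :: z :: l2' by simp, ← hps]; exact inv.hnxt)
      have hzps : z ∈ ps := by rw [hps]; simp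
      have hzm : z.1 < m := inv.hlt z hzps
      have hzx : x.1 ≠ z.1 := (hxz z List.mem_cons_self).ne
      have hvz : (vals.set x.1 (x.2 + y.2)).getD z.1 0 = z.2 := by
        rw [getD_set_ne _ _ _ _ _ hzx]
        exact inv.hvals z hzps
      have hprv1x : (prv.set z.1 (x.1 : Int)).getD x.1 0 = lastPosD l1 (-1) := by
        rw [getD_set_ne _ _ _ _ _ (fun h => hzx h.symm)]
        exact hprvx
      rcases List.eq_nil_or_concat' l1 with rfl | ⟨l1', w, rfl⟩
      · -- l1 = [], l2 = z :: l2'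
        have hstep : stepB (vals, alive, nxt, prv, events) =
            (vals.set x.1 (x.2 + y.2), alive.set y.1 false, nxt.set x.1 (z.1 : Int),
             prv.set z.1 (x.1 : Int),
             insortB rest ((x.2 + y.2) + z.2, (x.1 : Int))) := by
          rw [stepB_eq vals alive nxt prv events _ _ _ rest hpop]
          simp only [PySem.List.pyGetD_natCast, PySem.List.pySetD_natCast, hvx, hvy, hrq]
          simp only [if_pos (Int.natCast_nonneg z.1)]
          simp only [PySem.List.pyGetD_natCast, PySem.List.pySetD_natCast, hv1self, hvz,
            hprv1x, lastPosD, List.getLast?_nil]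
          simp only [if_neg (show ¬((0 : Int) ≤ -1) from by norm_num)]
        rw [hstep]
        refine ⟨?_, ?_, hspec, hlen', hhead⟩
        · exact InvB_merge m vals alive nxt prv ps [] x y (z :: l2') inv hps _
            (fun h => by simp at h) (fun z' l2'' h => by cases h; rfl)
            _ (fun h => by simp at h) (fun z' l2'' h => by cases h; rfl)
        · refine ⟨insortB_pairwise _ _ hrs, ?_, ?_⟩
          · intro e he
            rcases (insortB_mem _ _ _).mp he with rfl | he
            · exact Int.natCast_nonneg _
            · exact hrn e he
          · intro e he
            rw [show ([] : List (Nat × Int)) ++ (x.1, x.2 + y.2) :: z :: l2' = (x.1, x.2 + y.2) :: z :: l2' by simp] at he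
            rw [pairEv] at he
            rcases List.mem_cons.mp he with rfl | he
            · exact (insortB_mem _ _ _).mpr (Or.inl rfl)
            · exact (insortB_mem _ _ _).mpr (Or.inr (hsuffix z l2' rfl e he))
      · -- l1 = l1' ++ [w], l2 = z :: l2'
        have hwne : w.1 ≠ x.1 := (h1 w (by simp)).ne
        have hvw : (vals.set x.1 (x.2 + y.2)).getD w.1 0 = w.2 := by
          rw [getD_set_ne _ _ _ _ _ (fun h => hwne h.symm)]
          exact inv.hvals w (by rw [hps]; simp)
        have hstep : stepB (vals, alive, nxt, prv, events) =
            (vals.set x.1 (x.2 + y.2), alive.set y.1 false, nxt.set x.1 (z.1 : Int),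
             prv.set z.1 (x.1 : Int),
             insortB (insortB rest ((x.2 + y.2) + z.2, (x.1 : Int)))
               (w.2 + (x.2 + y.2), (w.1 : Int))) := by
          rw [stepB_eq vals alive nxt prv events _ _ _ rest hpop]
          simp only [PySem.List.pyGetD_natCast, PySem.List.pySetD_natCast, hvx, hvy, hrq]
          simp only [if_pos (Int.natCast_nonneg z.1)]
          simp only [PySem.List.pyGetD_natCast, PySem.List.pySetD_natCast, hv1self, hvz,
            hprv1x, lastPosD_concat]
          simp only [if_pos (Int.natCast_nonneg w.1)]
          simp only [PySem.List.pyGetD_natCast, hvw, hv1self]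
        rw [hstep]
        refine ⟨?_, ?_, hspec, hlen', hhead⟩
        · exact InvB_merge m vals alive nxt prv ps (l1' ++ [w]) x y (z :: l2') inv hps _
            (fun h => by simp at h) (fun z' l2'' h => by cases h; rfl)
            _ (fun h => by simp at h) (fun z' l2'' h => by cases h; rfl)
        · refine ⟨insortB_pairwise _ _ (insortB_pairwise _ _ hrs), ?_, ?_⟩
          · intro e he
            rcases (insortB_mem _ _ _).mp he with rfl | he
            · exact Int.natCast_nonneg _
            · rcases (insortB_mem _ _ _).mp he with rfl | he
              · exact Int.natCast_nonneg _
              · exact hrn e he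
          · intro e he
            rw [pairEv_split (l1' ++ [w]) (x.1, x.2 + y.2) z l2'] at he
            rcases List.mem_append.mp he with he | he
            · rw [pairEv_concat l1' w (x.1, x.2 + y.2)] at he
              rcases List.mem_append.mp he with he | he
              · exact (insortB_mem _ _ _).mpr (Or.inr ((insortB_mem _ _ _).mpr (Or.inr (hprefix e he))))
              · rcases List.mem_cons.mp he with rfl | he
                · exact (insortB_mem _ _ _).mpr (Or.inl rfl)
                · simp at he
            · rcases List.mem_cons.mp he with rfl | he
              · exact (insortB_mem _ _ _).mpr (Or.inr ((insortB_mem _ _ _).mpr (Or.inl rfl)))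
              · exact (insortB_mem _ _ _).mpr (Or.inr ((insortB_mem _ _ _).mpr (Or.inr (hsuffix z l2' rfl e he))))


-- ---------- the outer loop ----------

theorem foldl_const_iterate {α β : Type} (f : α → α) :
    ∀ (l : List β) (init : α), l.foldl (fun st _ => f st) init = f^[l.length] init := by
  intro l
  induction l with
  | nil => intro init; simp
  | cons b l ih => intro init; simp [ih, Function.iterate_succ_apply]

theorem loopB_spec : ∀ (k m : Nat)
    (st : List Int × List Bool × List Int × List Int × List (Int × Int))
    (ps : List (Nat × Int)),
    InvB m st.1 st.2.1 st.2.2.1 st.2.2.2.1 ps → EvOk st.2.2.2.2 ps → k + 1 ≤ ps.length →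
    ∃ ps', InvB m (stepB^[k] st).1 (stepB^[k] st).2.1 (stepB^[k] st).2.2.1
        (stepB^[k] st).2.2.2.1 ps' ∧
      EvOk (stepB^[k] st).2.2.2.2 ps' ∧
      ps'.map Prod.snd = specStep^[k] (ps.map Prod.snd) ∧
      ps'.length + k = ps.length ∧
      (ps'.map Prod.fst).head? = (ps.map Prod.fst).head? := by
  intro k
  induction k with
  | zero =>
      intro m st ps inv ev _
      exact ⟨ps, inv, ev, rfl, rfl, rfl⟩
  | succ k ih =>
      intro m st ps inv ev hk
      obtain ⟨vals, alive, nxt, prv, events⟩ := st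
      obtain ⟨ps1, inv1, ev1, hsnd1, hlen1, hhead1⟩ :=
        step_spec m vals alive nxt prv events ps inv ev (by omega)
      obtain ⟨ps', inv', ev', hsnd', hlen', hhead'⟩ :=
        ih m (stepB (vals, alive, nxt, prv, events)) ps1 inv1 ev1 (by omega)
      rw [Function.iterate_succ_apply]
      refine ⟨ps', inv', ev', ?_, by omega, hhead'.trans hhead1⟩
      rw [hsnd', hsnd1, ← Function.iterate_succ_apply]

-- ---------- the initial state ----------

theorem enumF_mem : ∀ (xs : List Int) (k : Nat) (pr : Nat × Int),
    pr ∈ enumF k xs ↔ ∃ i, i < xs.length ∧ pr = (k + i, xs.getD i 0) := by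
  intro xs
  induction xs with
  | nil => intro k pr; simp [enumF]
  | cons v t ih =>
      intro k pr
      simp only [enumF, List.mem_cons, ih (k + 1)]
      constructor
      · rintro (rfl | ⟨i, hi, rfl⟩)
        · exact ⟨0, by simp⟩
        · exact ⟨i + 1, by simp [hi], by simp [Nat.add_comm, Nat.add_assoc, Nat.add_left_comm]⟩
      · rintro ⟨i, hi, rfl⟩
        cases i with
        | zero => left; simp
        | succ i =>
            right
            exact ⟨i, by simp at hi; omega, by simp [Nat.add_comm, Nat.add_assoc, Nat.add_left_comm]⟩

theorem enumF_map_snd : ∀ (xs : List Int) (k : Nat), (enumF k xs).map Prod.snd = xs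
  | [], _ => rfl
  | v :: t, k => by simp [enumF, enumF_map_snd t (k + 1)]

theorem enumF_length : ∀ (xs : List Int) (k : Nat), (enumF k xs).length = xs.length
  | [], _ => rfl
  | v :: t, k => by simp [enumF, enumF_length t (k + 1)]

theorem enumF_mono : ∀ (xs : List Int) (k : Nat),
    ((enumF k xs).map Prod.fst).Pairwise (· < ·) := by
  intro xs
  induction xs with
  | nil => intro k; simp [enumF]
  | cons v t ih =>
      intro k
      simp only [enumF, List.map_cons]
      refine List.pairwise_cons.mpr ⟨?_, ih (k + 1)⟩
      intro b hb
      obtain ⟨pr, hpr, rfl⟩ := List.mem_map.mp hb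
      obtain ⟨i, -, rfl⟩ := (enumF_mem t (k + 1) pr).mp hpr
      omega

theorem NxtOk_enumF : ∀ (xs : List Int) (k : Nat) (nxt : List Int),
    (∀ i, k ≤ i → i + 1 < k + xs.length → nxt.getD i 0 = (i : Int) + 1) →
    (xs ≠ [] → nxt.getD (k + xs.length - 1) 0 = -1) →
    NxtOk nxt (enumF k xs) := by
  intro xs
  induction xs with
  | nil => intro k nxt _ _; trivial
  | cons v t ih =>
      intro k nxt h1 h2
      cases t with
      | nil =>
          show nxt.getD k 0 = -1
          simpa using h2 (by simp)
      | cons w t' =>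
          refine ⟨?_, ?_⟩
          · have := h1 k (le_refl _) (by simp)
            simpa using this
          · exact ih (k + 1) nxt (fun i hi hi2 => h1 i (by omega) (by simp at hi2 ⊢; omega))
              (fun _ => by
                have := h2 (by simp)
                simp only [List.length_cons] at this ⊢
                rw [show k + 1 + (t'.length + 1) - 1 = k + (t'.length + 1 + 1) - 1 by omega]
                exact this)

theorem PrvFrom_enumF : ∀ (xs : List Int) (k : Nat) (x0 : Int) (prv : List Int),
    (xs ≠ [] → prv.getD k 0 = x0) →
    (∀ i, k < i → i < k + xs.length → prv.getD i 0 = (i : Int) - 1) →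
    PrvFrom prv x0 (enumF k xs) := by
  intro xs
  induction xs with
  | nil => intro k x0 prv _ _; trivial
  | cons v t ih =>
      intro k x0 prv h0 h1
      refine ⟨h0 (by simp), ?_⟩
      refine ih (k + 1) (k : Int) prv ?_ ?_
      · intro ht
        have := h1 (k + 1) (by omega) (by simp [List.length_pos_iff.mpr ht])
        rw [this]; push_cast; ring
      · intro i hi hi2
        exact h1 i (by omega) (by simp at hi2 ⊢; omega)

theorem foldl_insort_pairwise (f : Nat → Int × Int) :
    ∀ (l : List Nat) (acc : List (Int × Int)), acc.Pairwise lexLe →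
    (l.foldl (fun a i => insortB a (f i)) acc).Pairwise lexLe := by
  intro l
  induction l with
  | nil => intro acc h; exact h
  | cons i l ih => intro acc h; exact ih _ (insortB_pairwise _ _ h)

theorem foldl_insort_mem (f : Nat → Int × Int) :
    ∀ (l : List Nat) (acc : List (Int × Int)) (x : Int × Int),
    (x ∈ acc ∨ ∃ i ∈ l, x = f i) → x ∈ l.foldl (fun a i => insortB a (f i)) acc := by
  intro l
  induction l with
  | nil =>
      intro acc x h
      rcases h with h | ⟨i, hi, _⟩
      · exact h
      · simp at hi
  | cons i l ih =>
      intro acc x h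
      refine ih _ x ?_
      rcases h with h | ⟨i', hi', rfl⟩
      · exact Or.inl ((insortB_mem _ _ _).mpr (Or.inr h))
      · rcases List.mem_cons.mp hi' with rfl | hi'
        · exact Or.inl ((insortB_mem _ _ _).mpr (Or.inl rfl))
        · exact Or.inr ⟨i', hi', rfl⟩

theorem foldl_insort_src (f : Nat → Int × Int) :
    ∀ (l : List Nat) (acc : List (Int × Int)) (x : Int × Int),
    x ∈ l.foldl (fun a i => insortB a (f i)) acc → x ∈ acc ∨ ∃ i ∈ l, x = f i := by
  intro l
  induction l with
  | nil => intro acc x h; exact Or.inl h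
  | cons i l ih =>
      intro acc x h
      rcases ih _ x h with h | ⟨i', hi', rfl⟩
      · rcases (insortB_mem _ _ _).mp h with rfl | h
        · exact Or.inr ⟨i, List.mem_cons_self, rfl⟩
        · exact Or.inl h
      · exact Or.inr ⟨i', List.mem_cons_of_mem _ hi', rfl⟩

theorem pairEv_enumF : ∀ (xs : List Int) (k : Nat),
    pairEv (enumF k xs) = (List.range (xs.length - 1)).map
      (fun i => (xs.getD i 0 + xs.getD (i + 1) 0, ((k + i : Nat) : Int))) := by
  intro xs
  induction xs with
  | nil => intro k; simp [enumF, pairEv]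
  | cons a t ih =>
      intro k
      cases t with
      | nil => simp [enumF, pairEv]
      | cons b t' =>
          have ihb := ih (k + 1)
          simp only [enumF, pairEv] at ihb ⊢
          rw [ihb]
          simp only [List.length_cons]
          rw [show b :: t' = b :: t' from rfl,
            show (t'.length + 1 + 1 - 1) = (t'.length + 1 - 1) + 1 by omega,
            List.range_succ_eq_map]
          simp only [List.map_cons, List.map_map]
          congr 1
          simp
          intro a _
          push_cast
          ring

-- ---------- the final walk ----------

theorem walkB_neg (vals nxt : List Int) (i : Int) (hi : i < 0) :
    ∀ fuel, walkB vals nxt fuel i = [] := by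
  intro fuel
  cases fuel with
  | zero => rfl
  | succ f => simp [walkB, show ¬ (0 ≤ i) by omega]

theorem walk_eq (vals nxt : List Int) : ∀ (t : List (Nat × Int)) (p : Nat) (a : Int) (fuel : Nat),
    NxtOk nxt ((p, a) :: t) → (∀ pr ∈ (p, a) :: t, vals.getD pr.1 0 = pr.2) →
    t.length + 1 ≤ fuel →
    walkB vals nxt fuel (p : Int) = a :: t.map Prod.snd := by
  intro t
  induction t with
  | nil =>
      intro p a fuel hn hv hf
      obtain ⟨f, rfl⟩ : ∃ f, fuel = f + 1 := ⟨fuel - 1, by omega⟩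
      show walkB vals nxt (f + 1) (p : Int) = [a]
      rw [walkB, if_pos (Int.natCast_nonneg p), PySem.List.pyGetD_natCast,
        PySem.List.pyGetD_natCast, hv (p, a) List.mem_cons_self]
      have hl : nxt.getD p 0 = -1 := hn
      rw [hl, walkB_neg vals nxt (-1) (by norm_num)]
  | cons y t' ih =>
      intro p a fuel hn hv hf
      obtain ⟨q, b⟩ := y
      obtain ⟨f, rfl⟩ : ∃ f, fuel = f + 1 := ⟨fuel - 1, by omega⟩
      rw [walkB, if_pos (Int.natCast_nonneg p), PySem.List.pyGetD_natCast,
        PySem.List.pyGetD_natCast, hv (p, a) List.mem_cons_self, hn.1]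
      rw [ih q b f hn.2 (fun pr hpr => hv pr (List.mem_cons_of_mem _ hpr)) (by simp at hf ⊢; omega)]
      simp

theorem getD_replicate_bool (m x : Nat) (c d : Bool) :
    (List.replicate m c).getD x d = if x < m then c else d := by
  split
  · rename_i h
    rw [List.getD_eq_getElem?_getD, List.getElem?_replicate, if_pos h]
    rfl
  · rename_i h
    rw [List.getD_eq_getElem?_getD, List.getElem?_eq_none (by simpa using Nat.le_of_not_lt h)]
    rfl

theorem getD_map_range (f : Nat → Int) (n i : Nat) (d : Int) (h : i < n) :
    (((List.range n).map f).getD i d) = f i := by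
  rw [List.getD_eq_getElem?_getD, List.getElem?_eq_getElem (by simpa using h)]
  simp

-- ===== VERDICT (by name: the statement is the Claim_ definition above) =====
theorem supplyWagon_spec : Claim_equal_supplyWagon := by
  intro s _ hpre
  unfold Spec_supplyWagon
  by_cases hm0 : s.length = 0
  · have hnil : s = [] := List.eq_nil_of_length_eq_zero hm0
    subst hnil
    rfl
  · have h2 : 2 ≤ s.length := by
      unfold Pre_supplyWagon at hpre
      omega
    have hdiv1 : 1 ≤ s.length / 2 := Nat.one_le_div_iff (by norm_num) |>.mpr h2
    have hA : supplyWagon s = specStep^[s.length - s.length / 2] s := by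
      unfold supplyWagon
      have hfd : PySem.Int.floordiv (PySem.List.len s) 2 = ((s.length / 2 : Nat) : Int) := by
        rw [PySem.List.len_eq]
        exact_mod_cast PySem.Int.floordiv_natCast s.length 2
      rw [hfd]
      exact loopA_eq (s.length - s.length / 2) s s.length ((s.length / 2 : Nat) : Int)
        (by exact_mod_cast hdiv1) (by push_cast; omega) (by omega)
    -- the initial B state
    have hm1 : 1 ≤ s.length := by omega
    have hnxt0 : ∀ i, i < s.length - 1 →
        (((List.range (s.length - 1)).map (fun (i : Nat) => (i : Int) + 1)) ++ [-1]).getD i 0 = (i : Int) + 1 := by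
      intro i hi
      rw [List.getD_append _ _ _ _ (by simpa using hi)]
      exact getD_map_range _ _ _ _ hi
    have hnxt0last :
        (((List.range (s.length - 1)).map (fun (i : Nat) => (i : Int) + 1)) ++ [-1]).getD (s.length - 1) 0 = -1 := by
      rw [List.getD_append_right _ _ _ _ (by simp)]
      simp
    have hprv0 : ∀ i, 0 < i → i < s.length →
        ((-1 : Int) :: (List.range (s.length - 1)).map (fun (i : Nat) => (i : Int))).getD i 0 = (i : Int) - 1 := by
      intro i h0 hi
      obtain ⟨i', rfl⟩ : ∃ i', i = i' + 1 := ⟨i - 1, by omega⟩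
      show ((List.range (s.length - 1)).map (fun (i : Nat) => (i : Int))).getD i' 0 = _
      rw [getD_map_range _ _ _ _ (by omega)]
      push_cast
      ring
    have inv0 : InvB s.length s (List.replicate s.length true)
        (((List.range (s.length - 1)).map (fun (i : Nat) => (i : Int) + 1)) ++ [-1])
        ((-1 : Int) :: (List.range (s.length - 1)).map (fun (i : Nat) => (i : Int)))
        (enumF 0 s) := by
      refine ⟨rfl, by simp, by simp; omega, by simp; omega, enumF_mono s 0, ?_, ?_, ?_, ?_, ?_⟩
      · intro pr hpr
        obtain ⟨i, hi, rfl⟩ := (enumF_mem s 0 pr).mp hpr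
        simpa using hi
      · intro pr hpr
        obtain ⟨i, hi, rfl⟩ := (enumF_mem s 0 pr).mp hpr
        simp
      · intro t
        rw [getD_replicate_bool]
        constructor
        · intro h
          split at h
          · rename_i hlt
            refine List.mem_map.mpr ⟨(t, s.getD t 0), (enumF_mem s 0 _).mpr ⟨t, hlt, by simp⟩, rfl⟩
          · simp at h
        · intro h
          obtain ⟨pr, hpr, rfl⟩ := List.mem_map.mp h
          obtain ⟨i, hi, rfl⟩ := (enumF_mem s 0 pr).mp hpr
          simp [hi]
      · refine NxtOk_enumF s 0 _ (fun i hi hi2 => hnxt0 i (by omega)) (fun _ => ?_)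
        simpa using hnxt0last
      · refine PrvFrom_enumF s 0 (-1) _ (fun _ => rfl) (fun i hi hi2 => hprv0 i hi (by omega))
    have ev0 : EvOk ((List.range (s.length - 1)).foldl
        (fun ev i => insortB ev (s.getD i 0 + s.getD (i + 1) 0, (i : Int))) []) (enumF 0 s) := by
      refine ⟨foldl_insort_pairwise _ _ [] (by simp), ?_, ?_⟩
      · intro e he
        rcases foldl_insort_src _ _ [] e he with h | ⟨i, hi, rfl⟩
        · simp at h
        · exact Int.natCast_nonneg _
      · intro e he
        rw [pairEv_enumF s 0] at he
        obtain ⟨i, hi, rfl⟩ := List.mem_map.mp he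
        refine foldl_insort_mem _ _ [] _ (Or.inr ⟨i, by simpa using hi, ?_⟩)
        simp
    have hB : supplyWagon_alt s = specStep^[s.length - s.length / 2] s := by
      simp only [supplyWagon_alt]
      rw [if_neg hm0]
      rw [foldl_const_iterate, List.length_range]
      obtain ⟨ps', inv', ev', hsnd', hlen', hhead'⟩ :=
        loopB_spec (s.length - s.length / 2) s.length
          (s, List.replicate s.length true,
           ((List.range (s.length - 1)).map (fun (i : Nat) => (i : Int) + 1)) ++ [-1],
           (-1 : Int) :: (List.range (s.length - 1)).map (fun (i : Nat) => (i : Int)),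
           (List.range (s.length - 1)).foldl
             (fun ev i => insortB ev (s.getD i 0 + s.getD (i + 1) 0, (i : Int))) [])
          (enumF 0 s) inv0 ev0 (by rw [enumF_length]; omega)
      rw [enumF_length] at hlen'
      -- ps' is nonempty and starts at position 0
      obtain ⟨p0, a, t, hps'⟩ : ∃ p0 a t, ps' = (p0, a) :: t := by
        cases ps' with
        | nil => exfalso; simp at hlen'; omega
        | cons h t => exact ⟨h.1, h.2, t, rfl⟩
      have hp0 : p0 = 0 := by
        rw [hps'] at hhead'
        cases s with
        | nil => simp at hm0
        | cons v s' =>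
            simp only [enumF, List.map_cons, List.head?_cons] at hhead'
            simpa using hhead'
      subst hp0
      rw [hps'] at inv' hsnd' hlen'
      have hwalk := walk_eq (stepB^[s.length - s.length / 2]
          (s, List.replicate s.length true,
           ((List.range (s.length - 1)).map (fun (i : Nat) => (i : Int) + 1)) ++ [-1],
           (-1 : Int) :: (List.range (s.length - 1)).map (fun (i : Nat) => (i : Int)),
           (List.range (s.length - 1)).foldl
             (fun ev i => insortB ev (s.getD i 0 + s.getD (i + 1) 0, (i : Int))) [])).1
        (stepB^[s.length - s.length / 2]
          (s, List.replicate s.length true,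
           ((List.range (s.length - 1)).map (fun (i : Nat) => (i : Int) + 1)) ++ [-1],
           (-1 : Int) :: (List.range (s.length - 1)).map (fun (i : Nat) => (i : Int)),
           (List.range (s.length - 1)).foldl
             (fun ev i => insortB ev (s.getD i 0 + s.getD (i + 1) 0, (i : Int))) [])).2.2.1
        t 0 a s.length inv'.hnxt inv'.hvals (by simp at hlen' ⊢; omega)
      rw [show ((0 : Nat) : Int) = (0 : Int) by simp] at hwalk
      rw [hwalk]
      rw [show a :: List.map Prod.snd t = List.map Prod.snd ((0, a) :: t) from rfl, hsnd',
        enumF_map_snd]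
    rw [hA, hB]
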